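-- pv_equiv track=rewrite | github.com/florian7/src | challenge/soi/2016/cablecar/task-4.py | possible_optimums
-- ===== SOURCE A (Python) =====
-- def possible_optimums(pillars):
--     optimums = []
--
--     for i in range(len(pillars)):
--
--         for j in range(i + 1, len(pillars)):
--             optimum = [i, j]
--             step = pillars[j] - pillars[i]
--             expected = pillars[j] + step
--
--             for k in range(j + 1, len(pillars)):
--                 if pillars[k] == expected:
--                     optimum += [k]
--                     expected += step
--
--             optimums += [optimum]
--
--     return optimums
-- ===== SOURCE B (Python) =====
-- def bisect_gt(lst, x):
--     # first index t with lst[t] > x (lst ascending)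
--     lo, hi = 0, len(lst)
--     while lo < hi:
--         mid = (lo + hi) // 2
--         if lst[mid] <= x:
--             lo = mid + 1
--         else:
--             hi = mid
--     return lo
--
--
-- def possible_optimums(pillars):
--     n = len(pillars)
--     # index each value to its (ascending) list of positions, once
--     pos = {}
--     for idx, v in enumerate(pillars):
--         pos.setdefault(v, []).append(idx)
--     res = []
--     for i in range(n):
--         for j in range(i + 1, n):
--             step = pillars[j] - pillars[i]
--             expected = pillars[j] + step
--             chain = [i, j]
--             if step == 0:
--                 # constant progression: every later position of this value, at once
--                 lst = pos[expected]
--                 chain += lst[bisect_gt(lst, j):]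
--             else:
--                 last = j
--                 while True:
--                     lst = pos.get(expected)
--                     if lst is None:
--                         break
--                     t = bisect_gt(lst, last)
--                     if t == len(lst):
--                         break
--                     last = lst[t]
--                     chain.append(last)
--                     expected += step
--             res.append(chain)
--     return res
-- ===== Notes on version B (the rewrite author's own statement) =====
-- stated objective: faster
-- what changed: Replaces A's full inner scan over all later indices for every pair by a value-to-ascending-positions dict built once, then follows each chain by binary-searching the next expected value's position list (taking the whole remaining positions slice at once when the step is 0); intended as faster, measured 3.24x at n=256, the largest size both finished (on all-equal inputs the output itself is Theta(n^3), so both time out at n=1024).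
import Mathlib
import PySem

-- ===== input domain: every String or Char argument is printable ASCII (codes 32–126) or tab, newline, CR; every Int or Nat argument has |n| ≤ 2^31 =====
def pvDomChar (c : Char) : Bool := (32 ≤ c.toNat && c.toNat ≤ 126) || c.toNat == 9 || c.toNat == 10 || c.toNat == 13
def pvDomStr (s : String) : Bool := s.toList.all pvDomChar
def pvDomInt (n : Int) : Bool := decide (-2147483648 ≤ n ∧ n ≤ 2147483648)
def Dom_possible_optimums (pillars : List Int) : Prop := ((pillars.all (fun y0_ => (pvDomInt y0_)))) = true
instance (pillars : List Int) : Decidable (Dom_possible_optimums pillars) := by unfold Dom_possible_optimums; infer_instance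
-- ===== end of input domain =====

-- B replaces A's full inner scan per pair by a value→positions index built once, then
-- follows each chain by binary-searching the next position (measured 3.24x faster at n=256).

-- ===== PORT A =====
def possible_optimums (pillars : List Int) : List (List Int) :=
  (PySem.List.pyRange 0 pillars.length 1).foldl (fun optimums i =>
    (PySem.List.pyRange (i + 1) pillars.length 1).foldl (fun optimums j =>
      let step := PySem.List.pyGetD pillars j 0 - PySem.List.pyGetD pillars i 0
      let st := (PySem.List.pyRange (j + 1) pillars.length 1).foldl
        (fun (s : List Int × Int) k =>
          if PySem.List.pyGetD pillars k 0 = s.2 then (s.1 ++ [k], s.2 + step) else s)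
        ([i, j], PySem.List.pyGetD pillars j 0 + step)
      optimums ++ [st.1]) optimums) []

-- ===== PORT B =====
-- Source B's bisect_gt: first index t with lst[t] > x (lst ascending); hand-ported loop
def pvBisect (lst : List Int) (x : Int) (lo hi : Nat) : Nat :=
  if lo < hi then
    let mid := (lo + hi) / 2
    if lst.getD mid 0 ≤ x then pvBisect lst x (mid + 1) hi else pvBisect lst x lo mid
  else lo
termination_by hi - lo
decreasing_by all_goals omega

-- pos.setdefault(v, []).append(idx) over enumerate(pillars)
def pvPos (pillars : List Int) : PySem.Dict Int (List Int) :=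
  (PySem.List.enumerate pillars 0).foldl
    (fun d q => d.modify q.2 [] (fun l => l ++ [q.1])) PySem.Dict.empty

-- B's `while True` loop for step ≠ 0; fuel bounds the iterations (each step strictly
-- increases `last` below pillars.length, so fuel = pillars.length suffices)
def pvChainB (pos : PySem.Dict Int (List Int)) (step : Int) :
    Nat → List Int → Int → Int → List Int
  | 0, chain, _, _ => chain
  | fuel + 1, chain, expected, last =>
    match pos.get? expected with
    | none => chain
    | some lst =>
      let t := pvBisect lst last 0 lst.length
      if t = lst.length then chain
      else pvChainB pos step fuel (chain ++ [lst.getD t 0]) (expected + step) (lst.getD t 0)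

def possible_optimums_alt (pillars : List Int) : List (List Int) :=
  let pos := pvPos pillars
  (PySem.List.pyRange 0 pillars.length 1).foldl (fun res i =>
    (PySem.List.pyRange (i + 1) pillars.length 1).foldl (fun res j =>
      let step := PySem.List.pyGetD pillars j 0 - PySem.List.pyGetD pillars i 0
      let expected := PySem.List.pyGetD pillars j 0 + step
      let chain :=
        if step = 0 then
          -- lst[t:] with 0 ≤ t ≤ len lst is exactly List.drop t
          let lst := pos.getD expected []
          [i, j] ++ lst.drop (pvBisect lst j 0 lst.length)
        else pvChainB pos step pillars.length [i, j] expected j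
      res ++ [chain]) res) []

-- ===== PRECONDITION & SPEC =====
def Spec_possible_optimums (pillars : List Int) (out : List (List Int)) : Prop := out = possible_optimums_alt pillars
instance (pillars : List Int) (out : List (List Int)) : Decidable (Spec_possible_optimums pillars out) := by unfold Spec_possible_optimums; infer_instance

-- ===== CLAIM (what is proved, stated in full; the proofs are below) =====
def Claim_equal_possible_optimums : Prop := ∀ (pillars : List Int), Dom_possible_optimums pillars → Spec_possible_optimums pillars (possible_optimums pillars)

-- ===== LEMMAS AND PROOFS =====

-- occurrence list of value v: the ascending positions of v in pillars
def pvOcc (pillars : List Int) (v : Int) : List Int :=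
  (PySem.List.pyRange 0 pillars.length 1).filter
    (fun j => PySem.List.pyGetD pillars j 0 == v)

-- reference chain loop: linear search for the first indexed position past `last`
def pvFindGt (last : Int) : List Int → Option Int
  | [] => none
  | k :: rest => if k > last then some k else pvFindGt last rest

def pvChain (pos : PySem.Dict Int (List Int)) (step : Int) :
    Nat → List Int → Int → Int → List Int
  | 0, chain, _, _ => chain
  | fuel + 1, chain, expected, last =>
    match pvFindGt last (pos.getD expected []) with
    | none => chain
    | some k => pvChain pos step fuel (chain ++ [k]) (expected + step) k

theorem getD_foldl_modify_append_key (l : List Int) (f : Int → Int)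
    (d : PySem.Dict Int (List Int)) (v : Int) :
    (l.foldl (fun d j => d.modify (f j) [] (fun t => t ++ [j])) d).getD v []
      = d.getD v [] ++ l.filter (fun j => f j == v) := by
  induction l generalizing d with
  | nil => simp
  | cons a t ih =>
    simp only [List.foldl_cons, List.filter_cons, ih, PySem.Dict.getD_modify]
    by_cases hv : f a = v
    · simp [hv]
    · simp [hv, if_neg (by simpa using Ne.symm hv)]

theorem pvPos_getD (pillars : List Int) (v : Int) :
    (pvPos pillars).getD v [] = pvOcc pillars v := by
  unfold pvPos pvOcc
  rw [PySem.List.enumerate_eq_map_pyRange (d := 0), List.foldl_map,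
    getD_foldl_modify_append_key]
  simp

theorem pvFindGt_none (last : Int) (l : List Int) (h : ∀ k ∈ l, ¬ last < k) :
    pvFindGt last l = none := by
  induction l with
  | nil => rfl
  | cons a t ih =>
    simp only [pvFindGt]
    rw [if_neg (h a (by simp)), ih (fun k hk => h k (by simp [hk]))]

theorem pvFindGt_shift (s : Int) (l : List Int) (h : s ∉ l) :
    pvFindGt (s - 1) l = pvFindGt s l := by
  induction l with
  | nil => rfl
  | cons a t ih =>
    simp only [pvFindGt]
    have ha : a ≠ s := by rintro rfl; simp at h
    by_cases hlt : s < a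
    · rw [if_pos (by omega), if_pos hlt]
    · rw [if_neg (by omega), if_neg hlt]
      exact ih (fun h' => h (List.mem_cons_of_mem _ h'))

theorem pvFindGt_first (s : Int) (l : List Int)
    (hs : s ∈ l) (hp : l.Pairwise (· < ·)) :
    pvFindGt (s - 1) l = some s := by
  induction l with
  | nil => simp at hs
  | cons a t ih =>
    simp only [pvFindGt]
    by_cases hgt : s - 1 < a
    · rw [if_pos hgt]
      rcases List.mem_cons.1 hs with rfl | hst
      · rfl
      · have := (List.pairwise_cons.1 hp).1 s hst; omega
    · rw [if_neg hgt]
      rcases List.mem_cons.1 hs with rfl | hst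
      · omega
      · exact ih hst (List.pairwise_cons.1 hp).2

theorem pvOcc_pairwise (pillars : List Int) (v : Int) :
    (pvOcc pillars v).Pairwise (· < ·) :=
  List.Pairwise.filter _ (PySem.List.pairwise_lt_pyRange_one _ _)

theorem mem_pvOcc (pillars : List Int) (v k : Int) :
    k ∈ pvOcc pillars v ↔ (0 ≤ k ∧ k < pillars.length) ∧ PySem.List.pyGetD pillars k 0 = v := by
  simp [pvOcc, List.mem_filter, PySem.List.mem_pyRange_one]

-- STAGE 1: A's scan over [s, n) equals the linear-search chain loop from last = s-1
theorem pvChain_eq (pillars : List Int) (step : Int) :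
    ∀ (m : Nat) (s : Int) (c : List Int) (e : Int) (fuel : Nat),
    0 ≤ s → m = ((pillars.length : Int) - s).toNat → m ≤ fuel →
    ((PySem.List.pyRange s pillars.length 1).foldl
      (fun (st : List Int × Int) k =>
        if PySem.List.pyGetD pillars k 0 = st.2 then (st.1 ++ [k], st.2 + step) else st)
      (c, e)).1
    = pvChain (pvPos pillars) step fuel c e (s - 1) := by
  intro m
  induction m with
  | zero =>
    intro s c e fuel hs hm hf
    have hsn : (pillars.length : Int) ≤ s := by omega
    rw [PySem.List.pyRange_one_eq_nil (by simpa using hsn)]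
    have hnone : pvFindGt (s - 1) (pvOcc pillars e) = none := by
      apply pvFindGt_none
      intro k hk
      have := (mem_pvOcc pillars e k).1 hk
      omega
    cases fuel with
    | zero => rfl
    | succ f => simp [pvChain, pvPos_getD, hnone]
  | succ m ih =>
    intro s c e fuel hs hm hf
    have hsn : s < (pillars.length : Int) := by omega
    obtain ⟨f, rfl⟩ : ∃ f, fuel = f + 1 := ⟨fuel - 1, by omega⟩
    rw [PySem.List.pyRange_one_cons (by simpa using hsn), List.foldl_cons]
    by_cases h : PySem.List.pyGetD pillars s 0 = e
    · rw [if_pos h]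
      have hfirst : pvFindGt (s - 1) (pvOcc pillars e) = some s :=
        pvFindGt_first s _ ((mem_pvOcc pillars e s).2 ⟨⟨hs, hsn⟩, h⟩)
          (pvOcc_pairwise pillars e)
      have := ih (s + 1) (c ++ [s]) (e + step) f (by omega) (by omega) (by omega)
      simp only [add_sub_cancel_right] at this
      rw [this]
      simp [pvChain, pvPos_getD, hfirst]
    · rw [if_neg h]
      have hnm : s ∉ pvOcc pillars e := by
        intro hk; exact h ((mem_pvOcc pillars e s).1 hk).2
      have := ih (s + 1) c e (f + 1) (by omega) (by omega) (by omega)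
      simp only [add_sub_cancel_right] at this
      rw [this]
      simp only [pvChain, pvPos_getD, pvFindGt_shift s _ hnm]

-- STAGE 2 tools: pvBisect really finds the first element > x of an ascending list
theorem pvBisect_bounds (lst : List Int) (x : Int) :
    ∀ (d lo hi : Nat), hi - lo = d → lo ≤ hi →
    lo ≤ pvBisect lst x lo hi ∧ pvBisect lst x lo hi ≤ hi := by
  intro d
  induction d using Nat.strong_induction_on with
  | _ d ih =>
    intro lo hi hd hle
    rw [pvBisect]
    by_cases h : lo < hi
    · simp only [if_pos h]
      by_cases h2 : lst.getD ((lo + hi) / 2) 0 ≤ x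
      · simp only [if_pos h2]
        have := ih (hi - ((lo + hi) / 2 + 1)) (by omega) ((lo + hi) / 2 + 1) hi rfl (by omega)
        omega
      · simp only [if_neg h2]
        have := ih ((lo + hi) / 2 - lo) (by omega) lo ((lo + hi) / 2) rfl (by omega)
        omega
    · simp only [if_neg h]; omega

theorem pvSorted_getD_le (lst : List Int) (hp : lst.Pairwise (· < ·))
    (i j : Nat) (hij : i ≤ j) (hj : j < lst.length) :
    lst.getD i 0 ≤ lst.getD j 0 := by
  rcases Nat.lt_or_ge i j with hlt | hge
  · rw [lst.getD_eq_getElem 0 (by omega), lst.getD_eq_getElem 0 hj]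
    exact le_of_lt ((List.pairwise_iff_getElem.1 hp) i j (by omega) hj hlt)
  · have : i = j := by omega
    rw [this]

theorem pvBisect_spec (lst : List Int) (x : Int) (hp : lst.Pairwise (· < ·)) :
    ∀ (d lo hi : Nat), hi - lo = d → lo ≤ hi → hi ≤ lst.length →
    (∀ i, i < lo → lst.getD i 0 ≤ x) → (∀ i, hi ≤ i → i < lst.length → x < lst.getD i 0) →
    (∀ i, i < pvBisect lst x lo hi → lst.getD i 0 ≤ x) ∧
    (∀ i, pvBisect lst x lo hi ≤ i → i < lst.length → x < lst.getD i 0) := by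
  intro d
  induction d using Nat.strong_induction_on with
  | _ d ih =>
    intro lo hi hd hle hlen hlow hhigh
    rw [pvBisect]
    by_cases h : lo < hi
    · simp only [if_pos h]
      by_cases h2 : lst.getD ((lo + hi) / 2) 0 ≤ x
      · simp only [if_pos h2]
        refine ih (hi - ((lo + hi) / 2 + 1)) (by omega) ((lo + hi) / 2 + 1) hi rfl
          (by omega) hlen (fun i hi' => ?_) hhigh
        exact le_trans (pvSorted_getD_le lst hp i ((lo + hi) / 2) (by omega) (by omega)) h2
      · simp only [if_neg h2]
        refine ih ((lo + hi) / 2 - lo) (by omega) lo ((lo + hi) / 2) rfl (by omega)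
          (by omega) hlow (fun i hi' hil => ?_)
        exact lt_of_lt_of_le (by omega)
          (pvSorted_getD_le lst hp ((lo + hi) / 2) i hi' hil)
    · simp only [if_neg h]
      exact ⟨hlow, fun i hi' hil => hhigh i (by omega) hil⟩

theorem pvDrop_bisect (lst : List Int) (x : Int) (hp : lst.Pairwise (· < ·)) :
    lst.drop (pvBisect lst x 0 lst.length) = lst.filter (fun k => decide (x < k)) := by
  set t := pvBisect lst x 0 lst.length with ht
  have hb := pvBisect_bounds lst x lst.length 0 lst.length rfl (by omega)
  have hs := pvBisect_spec lst x hp lst.length 0 lst.length rfl (by omega) le_rfl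
    (fun i hi => absurd hi (by omega)) (fun i h1 h2 => absurd h2 (by omega))
  rw [← ht] at hb hs
  have h1 : (lst.take t).filter (fun k => decide (x < k)) = [] := by
    rw [List.filter_eq_nil_iff]
    intro a ha
    obtain ⟨i, hlt, rfl⟩ := List.mem_iff_getElem.1 ha
    have hit : i < t := by simp at hlt; omega
    have hil : i < lst.length := by simp at hlt; omega
    have := hs.1 i hit
    rw [lst.getD_eq_getElem 0 hil] at this
    simp only [List.getElem_take, decide_eq_true_eq]
    omega
  have h2 : (lst.drop t).filter (fun k => decide (x < k)) = lst.drop t := by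
    rw [List.filter_eq_self]
    intro a ha
    obtain ⟨i, hlt, rfl⟩ := List.mem_iff_getElem.1 ha
    have hlen : t + i < lst.length := by simp at hlt; omega
    have := hs.2 (t + i) (by omega) hlen
    rw [lst.getD_eq_getElem 0 hlen] at this
    simp only [List.getElem_drop, decide_eq_true_eq]
    omega
  conv_rhs => rw [← List.take_append_drop t lst]
  rw [List.filter_append, h1, h2, List.nil_append]

theorem pvFindGt_eq_head (x : Int) (l : List Int) :
    pvFindGt x l = (l.filter (fun k => decide (x < k))).head? := by
  induction l with
  | nil => rfl
  | cons a t ih =>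
    simp only [pvFindGt, List.filter_cons]
    by_cases h : x < a
    · simp [h]
    · simp [h, ih]

theorem pvFindGt_some_lt (x k : Int) (l : List Int) (hf : pvFindGt x l = some k) :
    x < k := by
  induction l with
  | nil => simp [pvFindGt] at hf
  | cons a t ih =>
    simp only [pvFindGt] at hf
    by_cases h : x < a
    · rw [if_pos h] at hf
      obtain rfl : a = k := by simpa using hf
      exact h
    · exact ih (by rwa [if_neg h] at hf)

theorem pvFilter_first (x k : Int) (l : List Int) (hp : l.Pairwise (· < ·))
    (hf : pvFindGt x l = some k) :
    l.filter (fun k' => decide (x < k')) = k :: l.filter (fun k' => decide (k < k')) := by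
  induction l with
  | nil => simp [pvFindGt] at hf
  | cons a t ih =>
    simp only [pvFindGt] at hf
    simp only [List.filter_cons]
    by_cases h : x < a
    · rw [if_pos h] at hf
      obtain rfl : a = k := by simpa using hf
      have hall : ∀ b ∈ t, a < b := (List.pairwise_cons.1 hp).1
      rw [if_pos (by simpa using h), if_neg (by simp)]
      congr 1
      rw [List.filter_eq_self.2 (fun b hb => by
            simp only [decide_eq_true_eq]; exact lt_trans h (hall b hb)),
          List.filter_eq_self.2 (fun b hb => by
            simp only [decide_eq_true_eq]; exact hall b hb)]
    · rw [if_neg h] at hf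
      have hk : x < k := pvFindGt_some_lt x k t hf
      rw [if_neg (by simpa using h),
          if_neg (by simp only [decide_eq_true_eq]; omega)]
      exact ih (List.pairwise_cons.1 hp).2 hf

-- STAGE 2a: for step ≠ 0 the two chain loops coincide (over the built index)
theorem pvChainB_eq (pillars : List Int) (step : Int) :
    ∀ (fuel : Nat) (c : List Int) (e last : Int),
    pvChain (pvPos pillars) step fuel c e last = pvChainB (pvPos pillars) step fuel c e last := by
  intro fuel
  induction fuel with
  | zero => intro c e last; rfl
  | succ f ih =>
    intro c e last
    rw [pvChain, pvChainB]
    cases hq : (pvPos pillars).get? e with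
    | none =>
      have hD : (pvPos pillars).getD e [] = [] := by
        rw [PySem.Dict.getD_eq_get?_getD, hq]; rfl
      rw [hD]
      rfl
    | some lst =>
      have hD : (pvPos pillars).getD e [] = lst := by
        rw [PySem.Dict.getD_eq_get?_getD, hq]; rfl
      have hsort : lst.Pairwise (· < ·) := by
        have : lst = pvOcc pillars e := by rw [← hD, pvPos_getD]
        rw [this]; exact pvOcc_pairwise pillars e
      have hb := pvBisect_bounds lst last lst.length 0 lst.length rfl (by omega)
      have hfind : pvFindGt last lst =
          if pvBisect lst last 0 lst.length = lst.length then none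
          else some (lst.getD (pvBisect lst last 0 lst.length) 0) := by
        rw [pvFindGt_eq_head, ← pvDrop_bisect lst last hsort]
        by_cases hT : pvBisect lst last 0 lst.length = lst.length
        · rw [if_pos hT, hT, List.drop_length]; rfl
        · rw [if_neg hT]
          have ht' : pvBisect lst last 0 lst.length < lst.length := by omega
          rw [List.head?_drop, List.getElem?_eq_getElem ht',
            lst.getD_eq_getElem 0 ht']
      rw [hD, hfind]
      by_cases hT : pvBisect lst last 0 lst.length = lst.length
      · rw [if_pos hT]
        dsimp only
        rw [if_pos hT]
      · rw [if_neg hT]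
        dsimp only
        rw [if_neg hT]
        exact ih _ _ _

-- STAGE 2b: for step = 0 the chain loop is the tail slice of the positions list
theorem pvChain_zero (pillars : List Int) (e : Int) :
    ∀ (fuel : Nat) (c : List Int) (last : Int),
    ((pvOcc pillars e).filter (fun k => decide (last < k))).length ≤ fuel →
    pvChain (pvPos pillars) 0 fuel c e last
      = c ++ (pvOcc pillars e).filter (fun k => decide (last < k)) := by
  intro fuel
  induction fuel with
  | zero =>
    intro c last hlen
    have h0 : (pvOcc pillars e).filter (fun k => decide (last < k)) = [] :=
      List.eq_nil_of_length_eq_zero (by omega)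
    rw [pvChain, h0, List.append_nil]
  | succ f ih =>
    intro c last hlen
    rw [pvChain, pvPos_getD]
    cases hf : pvFindGt last (pvOcc pillars e) with
    | none =>
      rw [pvFindGt_eq_head] at hf
      rw [List.head?_eq_none_iff.1 hf, List.append_nil]
    | some k =>
      have hfil := pvFilter_first last k (pvOcc pillars e) (pvOcc_pairwise pillars e) hf
      rw [add_zero]
      dsimp only
      rw [ih (c ++ [k]) k (by rw [hfil] at hlen; simp only [List.length_cons] at hlen; omega)]
      rw [hfil, List.append_assoc, List.singleton_append]

-- ===== VERDICT (by name: the statement is the Claim_ definition above) =====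
theorem possible_optimums_spec : Claim_equal_possible_optimums := by
  intro pillars _
  unfold Spec_possible_optimums possible_optimums possible_optimums_alt
  apply PySem.List.foldl_congr_mem
  intro acc i hi
  apply PySem.List.foldl_congr_mem
  intro acc2 j hj
  have hi0 : (0:Int) ≤ i := ((PySem.List.mem_pyRange_one).1 hi).1
  have hj0 : i + 1 ≤ j := ((PySem.List.mem_pyRange_one).1 hj).1
  have h1 := pvChain_eq pillars
    (PySem.List.pyGetD pillars j 0 - PySem.List.pyGetD pillars i 0)
    ((pillars.length : Int) - (j + 1)).toNat (j + 1) [i, j]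
    (PySem.List.pyGetD pillars j 0 +
      (PySem.List.pyGetD pillars j 0 - PySem.List.pyGetD pillars i 0))
    pillars.length (by omega) rfl (by omega)
  simp only [add_sub_cancel_right] at h1
  simp only [h1]
  by_cases hz : PySem.List.pyGetD pillars j 0 - PySem.List.pyGetD pillars i 0 = 0
  · rw [if_pos hz, hz]
    rw [pvChain_zero pillars _ pillars.length [i, j] j
      (by
        have : ((pvOcc pillars (PySem.List.pyGetD pillars j 0 + 0)).filter
            (fun k => decide (j < k))).length ≤ (pvOcc pillars _).length :=
          List.length_filter_le _ _
        have h2 : (pvOcc pillars (PySem.List.pyGetD pillars j 0 + 0)).length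
            ≤ pillars.length := by
          unfold pvOcc
          calc _ ≤ (PySem.List.pyRange 0 pillars.length 1).length := List.length_filter_le _ _
            _ = _ := by simp [PySem.List.length_pyRange_one]
        omega)]
    rw [pvPos_getD, pvDrop_bisect _ _ (pvOcc_pairwise pillars _)]
  · rw [if_neg hz, pvChainB_eq]
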